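-- pv_equiv track=rewrite | github.com/smdion/gaggiuino-barista | src/annotation_engine.py | match_profile_by_name
-- ===== SOURCE A (Python) =====
-- def normalize_profile_name(name: str) -> str:
--     """
--     Normalize profile name for comparison by removing common variations.
--
--     Handles:
--     - Case differences
--     - Whitespace
--     - Hyphens vs underscores
--     """
--     if not name:
--         return ""
--     return name.lower().strip().replace(" ", "").replace("-", "").replace("_", "")
--
-- def match_profile_by_name(shot_profile_name: str, local_profiles: list) -> dict | None:
--     """
--     Try to match a shot's profile name against loaded profiles.
--
--     Matching strategy:
--     1. Exact match (after normalization)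
--     2. Partial match (shot name contained in profile name or vice versa)
--
--     Args:
--         shot_profile_name: Name of profile from Gaggiuino shot
--         local_profiles: List of loaded profile dicts
--
--     Returns:
--         Matched profile dict or None
--     """
--     if not shot_profile_name:
--         return None
--
--     shot_normalized = normalize_profile_name(shot_profile_name)
--
--     # First pass: exact match
--     for lp in local_profiles:
--         lp_name = lp.get("name", "")
--         lp_normalized = normalize_profile_name(lp_name)
--
--         if lp_normalized == shot_normalized:
--             return lp
--
--     # Second pass: partial match
--     for lp in local_profiles:
--         lp_name = lp.get("name", "")
--         lp_normalized = normalize_profile_name(lp_name)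
--
--         if shot_normalized in lp_normalized or lp_normalized in shot_normalized:
--             return lp
--
--     return None
-- ===== SOURCE B (Python) =====
-- def normalize_profile_name(name: str) -> str:
--     if not name:
--         return ""
--     return name.lower().strip().replace(" ", "").replace("-", "").replace("_", "")
--
-- def match_profile_by_name(shot_profile_name: str, local_profiles: list) -> dict | None:
--     if not shot_profile_name:
--         return None
--     shot_normalized = normalize_profile_name(shot_profile_name)
--     first_exact = None
--     first_partial = None
--     for lp in local_profiles:
--         lp_normalized = normalize_profile_name(lp.get("name", ""))
--         if first_exact is None and lp_normalized == shot_normalized: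
--             first_exact = lp
--         if first_partial is None and (shot_normalized in lp_normalized or lp_normalized in shot_normalized):
--             first_partial = lp
--     return first_exact if first_exact is not None else first_partial
-- ===== Notes on version B (the rewrite author's own statement) =====
-- stated objective: simpler
-- what changed: Replaces A's two sequential scans (exact pass, then partial pass, each normalizing every name again) with one single pass that normalizes each profile name once and keeps the first exact and first partial candidates, preferring the exact one at the end.
import Mathlib
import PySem

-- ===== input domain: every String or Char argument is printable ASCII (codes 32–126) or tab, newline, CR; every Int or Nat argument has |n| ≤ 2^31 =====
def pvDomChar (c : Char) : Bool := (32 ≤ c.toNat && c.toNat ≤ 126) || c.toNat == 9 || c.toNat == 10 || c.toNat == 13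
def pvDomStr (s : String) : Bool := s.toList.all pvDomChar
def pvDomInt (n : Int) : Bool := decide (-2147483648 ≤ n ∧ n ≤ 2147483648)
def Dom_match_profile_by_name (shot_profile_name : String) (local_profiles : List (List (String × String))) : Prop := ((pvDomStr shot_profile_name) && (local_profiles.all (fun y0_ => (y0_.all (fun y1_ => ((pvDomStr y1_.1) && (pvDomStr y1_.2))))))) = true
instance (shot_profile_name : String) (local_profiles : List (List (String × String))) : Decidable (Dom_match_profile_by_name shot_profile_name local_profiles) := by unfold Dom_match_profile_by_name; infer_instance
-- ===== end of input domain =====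

-- B replaces A's two sequential scans by one pass keeping first-exact / first-partial candidates (simpler).

-- ===== PORT A =====
-- normalize_profile_name, shared helper of both Pythons
def normalize_profile_name (name : String) : String :=
  if PySem.Str.len name == 0 then ""
  else PySem.Str.replace (PySem.Str.replace (PySem.Str.replace (PySem.Str.strip (PySem.Str.lower name)) " " "") "-" "") "_" ""

-- first pass: exact match (Python's first for-loop, first hit returned)
def pvPassExact (shot_normalized : String) : List (List (String × String)) → Option (List (String × String))
  | [] => none
  | lp :: rest =>
      if normalize_profile_name (PySem.Dict.getD (PySem.Dict.mk lp) "name" "") == shot_normalized then some lp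
      else pvPassExact shot_normalized rest

-- second pass: partial match (Python's second for-loop)
def pvPassPartial (shot_normalized : String) : List (List (String × String)) → Option (List (String × String))
  | [] => none
  | lp :: rest =>
      let lp_normalized := normalize_profile_name (PySem.Dict.getD (PySem.Dict.mk lp) "name" "")
      if PySem.Str.isIn shot_normalized lp_normalized || PySem.Str.isIn lp_normalized shot_normalized then some lp
      else pvPassPartial shot_normalized rest

def match_profile_by_name (shot_profile_name : String) (local_profiles : List (List (String × String))) : Option (List (String × String)) :=
  if PySem.Str.len shot_profile_name == 0 then none
  else
    let shot_normalized := normalize_profile_name shot_profile_name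
    match pvPassExact shot_normalized local_profiles with
    | some lp => some lp
    | none => pvPassPartial shot_normalized local_profiles

-- ===== PORT B =====
def pvStepB (shot_normalized : String)
    (st : Option (List (String × String)) × Option (List (String × String)))
    (lp : List (String × String)) :
    Option (List (String × String)) × Option (List (String × String)) :=
  let lp_normalized := normalize_profile_name (PySem.Dict.getD (PySem.Dict.mk lp) "name" "")
  let fe := if st.1.isNone && (lp_normalized == shot_normalized) then some lp else st.1
  let fp := if st.2.isNone && (PySem.Str.isIn shot_normalized lp_normalized || PySem.Str.isIn lp_normalized shot_normalized) then some lp else st.2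
  (fe, fp)

def match_profile_by_name_alt (shot_profile_name : String) (local_profiles : List (List (String × String))) : Option (List (String × String)) :=
  if PySem.Str.len shot_profile_name == 0 then none
  else
    let shot_normalized := normalize_profile_name shot_profile_name
    let st := local_profiles.foldl (pvStepB shot_normalized) (none, none)
    match st.1 with
    | some lp => some lp
    | none => st.2

-- ===== PRECONDITION & SPEC =====
def Spec_match_profile_by_name (shot_profile_name : String) (local_profiles : List (List (String × String))) (out : Option (List (String × String))) : Prop := out = match_profile_by_name_alt shot_profile_name local_profiles
instance (shot_profile_name : String) (local_profiles : List (List (String × String))) (out : Option (List (String × String))) : Decidable (Spec_match_profile_by_name shot_profile_name local_profiles out) := by unfold Spec_match_profile_by_name; infer_instance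

-- ===== CLAIM (what is proved, stated in full; the proofs are below) =====
def Claim_equal_match_profile_by_name : Prop := ∀ (shot_profile_name : String) (local_profiles : List (List (String × String))), Dom_match_profile_by_name shot_profile_name local_profiles → Spec_match_profile_by_name shot_profile_name local_profiles (match_profile_by_name shot_profile_name local_profiles)

-- ===== LEMMAS AND PROOFS =====
-- B's fold with accumulator (e, p): each component keeps its first hit; relate to A's two passes.
theorem pvFoldB_eq (sn : String) (l : List (List (String × String)))
    (e p : Option (List (String × String))) :
    l.foldl (pvStepB sn) (e, p) =
      ((match e with | some x => some x | none => pvPassExact sn l),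
       (match p with | some x => some x | none => pvPassPartial sn l)) := by
  induction l generalizing e p with
  | nil => cases e <;> cases p <;> simp [pvPassExact, pvPassPartial]
  | cons lp rest ih =>
      simp only [List.foldl_cons, pvStepB]
      cases e <;> cases p <;>
        simp only [Option.isNone_none, Option.isNone_some, Bool.true_and, Bool.false_and,
          ih, pvPassExact, pvPassPartial] <;>
        split_ifs <;> simp_all

theorem match_profile_by_name_eq_alt (s : String) (l : List (List (String × String))) :
    match_profile_by_name s l = match_profile_by_name_alt s l := by
  unfold match_profile_by_name match_profile_by_name_alt
  split
  · rfl
  · simp only [pvFoldB_eq]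

-- ===== VERDICT (by name: the statement is the Claim_ definition above) =====
theorem match_profile_by_name_spec : Claim_equal_match_profile_by_name := by
  intro s l _
  unfold Spec_match_profile_by_name
  exact match_profile_by_name_eq_alt s l
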